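-- pv_equiv track=rewrite | github.com/kkr010128/codebert | problem072/problem072_18.py | solution
-- ===== SOURCE A (Python) =====
-- def solution(arr):
--   count = 0
--   for i, j in arr:
--     if i == j:
--       count += 1
--     else:
--       count = 0
--     if count == 3:
--       return 'Yes'
--   return 'No'
-- ===== SOURCE B (Python) =====
-- def solution(arr):
--     eq = [i == j for i, j in arr]
--     if any(eq[t] and eq[t + 1] and eq[t + 2] for t in range(len(eq) - 2)):
--         return 'Yes'
--     return 'No'
-- ===== Notes on version B (the rewrite author's own statement) =====
-- stated objective: alternative
-- what changed: Replaces the running counter-with-reset by a precomputed equality-flag list tested with a sliding window of width 3 over all start indices.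
import Mathlib
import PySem

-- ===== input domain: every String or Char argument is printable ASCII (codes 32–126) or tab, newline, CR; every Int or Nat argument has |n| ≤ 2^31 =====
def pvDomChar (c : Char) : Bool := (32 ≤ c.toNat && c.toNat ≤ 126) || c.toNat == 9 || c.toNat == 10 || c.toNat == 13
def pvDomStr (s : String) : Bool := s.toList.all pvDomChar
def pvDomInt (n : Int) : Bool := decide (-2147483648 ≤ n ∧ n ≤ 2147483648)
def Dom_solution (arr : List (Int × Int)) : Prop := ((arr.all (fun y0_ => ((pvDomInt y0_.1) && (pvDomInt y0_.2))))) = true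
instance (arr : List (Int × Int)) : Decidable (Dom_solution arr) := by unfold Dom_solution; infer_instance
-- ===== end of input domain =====

-- B replaces A's running counter-with-reset by an equality-flag list tested with a sliding width-3 window (alternative decomposition, same cost).


-- ===== PORT A =====
-- loop over the pairs carrying the running count, early return on count == 3
def solLoop : List (Int × Int) → Int → String
  | [], _ => "No"
  | p :: rest, count =>
    let count' := if p.1 = p.2 then count + 1 else 0
    if count' = 3 then "Yes" else solLoop rest count'

def solution (arr : List (Int × Int)) : String := solLoop arr 0

-- ===== PORT B =====
def solution_alt (arr : List (Int × Int)) : String :=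
  let eq := arr.map (fun p => p.1 == p.2)
  if (PySem.List.pyRange 0 ((eq.length : Int) - 2) 1).any (fun t =>
      PySem.List.pyGetD eq t false && PySem.List.pyGetD eq (t + 1) false
        && PySem.List.pyGetD eq (t + 2) false)
  then "Yes" else "No"

-- ===== PRECONDITION & SPEC =====
def Spec_solution (arr : List (Int × Int)) (out : String) : Prop := out = solution_alt arr
instance (arr : List (Int × Int)) (out : String) : Decidable (Spec_solution arr out) := by unfold Spec_solution; infer_instance

-- ===== CLAIM (what is proved, stated in full; the proofs are below) =====
def Claim_equal_solution : Prop := ∀ (arr : List (Int × Int)), Dom_solution arr → Spec_solution arr (solution arr)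

-- ===== LEMMAS AND PROOFS =====

-- the same loop over the equality flags only
def loopF : List Bool → Int → String
  | [], _ => "No"
  | f :: fs, count =>
    let count' := if f then count + 1 else 0
    if count' = 3 then "Yes" else loopF fs count'

-- first n entries exist and are true
def prefTrue : List Bool → Nat → Bool
  | _, 0 => true
  | [], _ + 1 => false
  | f :: fs, n + 1 => f && prefTrue fs n

-- some window of 3 consecutive trues
def hasWin : List Bool → Bool
  | a :: b :: c :: r => a && b && c || hasWin (b :: c :: r)
  | _ => false

theorem solLoop_eq_loopF (arr : List (Int × Int)) (c : Int) :
    solLoop arr c = loopF (arr.map (fun p => p.1 == p.2)) c := by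
  induction arr generalizing c with
  | nil => rfl
  | cons p rest ih =>
    simp only [solLoop, loopF, List.map_cons]
    by_cases h : p.1 = p.2 <;> simp [h, ih]

theorem prefTrue_mono (fs : List Bool) (n m : Nat) (h : n ≤ m)
    (hm : prefTrue fs m = true) : prefTrue fs n = true := by
  induction fs generalizing n m with
  | nil =>
    cases m with
    | zero => have hn0 : n = 0 := by omega
              subst hn0; rfl
    | succ m => simp [prefTrue] at hm
  | cons f fs ih =>
    cases n with
    | zero => rfl
    | succ n =>
      cases m with
      | zero => omega
      | succ m =>
        simp only [prefTrue, Bool.and_eq_true] at hm ⊢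
        exact ⟨hm.1, ih n m (by omega) hm.2⟩

theorem hasWin_cons (f : Bool) (fs : List Bool) :
    hasWin (f :: fs) = ((f && prefTrue fs 2) || hasWin fs) := by
  match fs with
  | [] => simp [hasWin, prefTrue]
  | [b] => simp [hasWin, prefTrue]
  | b :: c :: r => simp [hasWin, prefTrue, Bool.and_assoc]

theorem prefTrue_three_hasWin (fs : List Bool) (h : prefTrue fs 3 = true) :
    hasWin fs = true := by
  match fs with
  | [] => simp [prefTrue] at h
  | [a] => simp [prefTrue] at h
  | [a, b] => simp [prefTrue] at h
  | a :: b :: c :: r =>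
    simp only [prefTrue, Bool.and_eq_true] at h
    simp [hasWin, h.1, h.2.1, h.2.2.1]

theorem loopF_char (fs : List Bool) (n : Nat) (hn : n ≤ 2) :
    loopF fs (n : Int) = if (prefTrue fs (3 - n) || hasWin fs) = true then "Yes" else "No" := by
  induction fs generalizing n with
  | nil =>
    have h3 : 3 - n = (3 - n - 1) + 1 := by omega
    rw [h3]
    simp [loopF, prefTrue, hasWin]
  | cons f fs ih =>
    cases f with
    | true =>
      by_cases h2 : n = 2
      · subst h2
        have : loopF (true :: fs) ((2 : Nat) : Int) = "Yes" := by
          simp [loopF]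
        rw [this]
        have hp : prefTrue (true :: fs) (3 - 2) = true := by simp [prefTrue]
        simp [hp]
      · have hstep : loopF (true :: fs) ((n : Nat) : Int) = loopF fs ((n + 1 : Nat) : Int) := by
          simp only [loopF]
          have : ¬ ((n : Int) + 1 = 3) := by omega
          push_cast
          simp [this]
        rw [hstep, ih (n + 1) (by omega)]
        have h3 : 3 - n = (2 - n) + 1 := by omega
        have h3' : 3 - (n + 1) = 2 - n := by omega
        rw [h3, h3', hasWin_cons]
        simp only [prefTrue, Bool.true_and]
        by_cases hw : hasWin fs = true
        · simp [hw]
        · simp only [Bool.not_eq_true] at hw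
          simp only [hw, Bool.or_false]
          by_cases hp2 : prefTrue fs 2 = true
          · have := prefTrue_mono fs (2 - n) 2 (by omega) hp2
            simp [hp2, this]
          · simp only [Bool.not_eq_true] at hp2
            simp [hp2]
    | false =>
      have hstep : loopF (false :: fs) ((n : Nat) : Int) = loopF fs ((0 : Nat) : Int) := by
        simp [loopF]
      rw [hstep, ih 0 (by omega)]
      have h3 : 3 - n = (3 - n - 1) + 1 := by omega
      rw [h3, hasWin_cons]
      simp only [prefTrue, Bool.false_and, Bool.false_or]
      by_cases hp3 : prefTrue fs 3 = true
      · simp [hp3, prefTrue_three_hasWin fs hp3]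
      · simp only [Bool.not_eq_true] at hp3
        simp [hp3]

theorem hasWin_iff : ∀ (l : List Bool), hasWin l = true ↔ ∃ k : Nat, k + 2 < l.length ∧
      (l.getD k false && l.getD (k + 1) false && l.getD (k + 2) false) = true
  | [] => by simp [hasWin]
  | [a] => by simp [hasWin]
  | [a, b] => by simp [hasWin]
  | a :: b :: c :: r => by
    have ih := hasWin_iff (b :: c :: r)
    simp only [hasWin, Bool.or_eq_true, ih]
    constructor
    · rintro (h | ⟨k, hk, h⟩)
      · exact ⟨0, by simp only [List.length_cons]; omega, by simpa using h⟩
      · exact ⟨k + 1, by simp only [List.length_cons] at hk ⊢; omega, by simpa using h⟩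
    · rintro ⟨k, hk, h⟩
      cases k with
      | zero => exact Or.inl (by simpa using h)
      | succ k =>
        exact Or.inr ⟨k, by simp only [List.length_cons] at hk ⊢; omega, by simpa using h⟩

theorem any_char (eq : List Bool) :
    ((PySem.List.pyRange 0 ((eq.length : Int) - 2) 1).any (fun t =>
      PySem.List.pyGetD eq t false && PySem.List.pyGetD eq (t + 1) false
        && PySem.List.pyGetD eq (t + 2) false)) = hasWin eq := by
  by_cases hw : hasWin eq = true
  · rw [hw]
    rw [List.any_eq_true]
    obtain ⟨k, hk, h⟩ := (hasWin_iff eq).1 hw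
    refine ⟨(k : Int), ?_, ?_⟩
    · rw [PySem.List.mem_pyRange_one]
      constructor <;> [positivity; omega]
    · have e1 : (k : Int) + 1 = ((k + 1 : Nat) : Int) := by push_cast; ring
      have e2 : (k : Int) + 2 = ((k + 2 : Nat) : Int) := by push_cast; ring
      rw [e1, e2]
      simp only [PySem.List.pyGetD_natCast]
      exact h
  · simp only [Bool.not_eq_true] at hw
    rw [hw]
    rw [List.any_eq_false]
    intro t ht
    rw [PySem.List.mem_pyRange_one] at ht
    obtain ⟨k, rfl⟩ : ∃ k : Nat, t = (k : Int) := ⟨t.toNat, by omega⟩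
    intro hcontra
    apply absurd hw
    simp only [Bool.not_eq_false]
    rw [hasWin_iff]
    refine ⟨k, by omega, ?_⟩
    have e1 : (k : Int) + 1 = ((k + 1 : Nat) : Int) := by push_cast; ring
    have e2 : (k : Int) + 2 = ((k + 2 : Nat) : Int) := by push_cast; ring
    rw [e1, e2] at hcontra
    simpa only [PySem.List.pyGetD_natCast] using hcontra

theorem alt_char (arr : List (Int × Int)) :
    solution_alt arr = if hasWin (arr.map (fun p => p.1 == p.2)) = true then "Yes" else "No" := by
  simp only [solution_alt]
  rw [any_char]

-- ===== VERDICT (by name: the statement is the Claim_ definition above) =====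
theorem solution_spec : Claim_equal_solution := by
  intro arr _
  unfold Spec_solution
  rw [alt_char]
  show solution arr = _
  unfold solution
  rw [solLoop_eq_loopF]
  have h0 : (0 : Int) = ((0 : Nat) : Int) := rfl
  rw [h0, loopF_char _ 0 (by omega)]
  set fs := arr.map (fun p => p.1 == p.2)
  by_cases hp3 : prefTrue fs 3 = true
  · simp [hp3, prefTrue_three_hasWin fs hp3]
  · simp only [Bool.not_eq_true] at hp3
    simp [hp3]
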